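-- pv_equiv track=rewrite | github.com/BUT-RT-Info/Referentiels | python/activite.py | get_total_coeffs
-- ===== SOURCE A (Python) =====
-- def get_total_coeffs(matrice_coeffs):
--     sommes = [
--         sum(
--             [
--                 matrice_coeffs[i][j]
--                 for i in range(len(matrice_coeffs))
--                 if matrice_coeffs[i][j]
--             ]
--         )
--         for j in range(3)
--     ]
--     return sommes
-- ===== SOURCE B (Python) =====
-- def get_total_coeffs(matrice_coeffs):
--     s0 = s1 = s2 = 0
--     for row in matrice_coeffs:
--         s0 += row[0]
--         s1 += row[1]
--         s2 += row[2]
--     return [s0, s1, s2]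
-- ===== Notes on version B (the rewrite author's own statement) =====
-- stated objective: simpler
-- what changed: Replaces three independent column-wise comprehensions (one scan of the matrix per column, with a truthiness filter) by a single row-major pass maintaining three scalar accumulators; the zero-skip filter is dropped since adding 0 is a no-op on integers.
import Mathlib
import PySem

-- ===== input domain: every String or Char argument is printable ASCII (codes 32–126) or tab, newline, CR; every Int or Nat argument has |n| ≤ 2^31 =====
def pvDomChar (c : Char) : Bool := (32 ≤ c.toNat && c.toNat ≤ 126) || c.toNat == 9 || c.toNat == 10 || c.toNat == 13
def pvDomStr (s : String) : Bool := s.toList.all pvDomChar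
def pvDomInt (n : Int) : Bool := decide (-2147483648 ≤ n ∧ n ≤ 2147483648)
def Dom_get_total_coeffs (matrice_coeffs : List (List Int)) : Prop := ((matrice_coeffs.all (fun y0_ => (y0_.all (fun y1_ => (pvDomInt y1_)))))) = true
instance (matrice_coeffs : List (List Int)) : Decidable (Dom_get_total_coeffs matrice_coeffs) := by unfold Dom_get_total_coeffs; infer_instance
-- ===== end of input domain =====

-- B changes the decomposition only (one row-major pass with three accumulators instead of
-- three column-wise filtered comprehensions); return value proved equal on Pre_.

-- ===== PORT A =====
-- sommes = [sum([m[i][j] for i in range(len(m)) if m[i][j]]) for j in range(3)]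
-- (indexing via pyGetD is exact under Pre_, which puts every index in range)
def get_total_coeffs (matrice_coeffs : List (List Int)) : List Int :=
  (PySem.List.pyRange 0 3 1).map (fun j =>
    (((PySem.List.pyRange 0 matrice_coeffs.length 1).map
        (fun i => PySem.List.pyGetD (PySem.List.pyGetD matrice_coeffs i []) j 0)).filter
      (fun x => x ≠ 0)).sum)

-- ===== PORT B =====
-- s0 = s1 = s2 = 0; for row in m: s0 += row[0]; s1 += row[1]; s2 += row[2]; return [s0,s1,s2]
def get_total_coeffs_alt (matrice_coeffs : List (List Int)) : List Int :=
  let s := matrice_coeffs.foldl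
    (fun (s : Int × Int × Int) row =>
      (s.1 + PySem.List.pyGetD row 0 0,
       s.2.1 + PySem.List.pyGetD row 1 0,
       s.2.2 + PySem.List.pyGetD row 2 0))
    (0, 0, 0)
  [s.1, s.2.1, s.2.2]

-- ===== PRECONDITION & SPEC =====
-- Pre_ excludes exactly the inputs on which Python A raises IndexError: a row shorter than 3.
def Pre_get_total_coeffs (matrice_coeffs : List (List Int)) : Prop :=
  ∀ row ∈ matrice_coeffs, 3 ≤ row.length
instance (matrice_coeffs : List (List Int)) : Decidable (Pre_get_total_coeffs matrice_coeffs) := by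
  unfold Pre_get_total_coeffs; infer_instance
def pvWitness_get_total_coeffs : List (List Int) := [[1, 2, 3], [0, -1, 4]]
def Spec_get_total_coeffs (matrice_coeffs : List (List Int)) (out : List Int) : Prop :=
  out = get_total_coeffs_alt matrice_coeffs
instance (matrice_coeffs : List (List Int)) (out : List Int) : Decidable (Spec_get_total_coeffs matrice_coeffs out) := by
  unfold Spec_get_total_coeffs; infer_instance

-- ===== CLAIM =====
def Claim_equal_get_total_coeffs : Prop :=
  ∀ (matrice_coeffs : List (List Int)), Dom_get_total_coeffs matrice_coeffs →
    Pre_get_total_coeffs matrice_coeffs →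
    Spec_get_total_coeffs matrice_coeffs (get_total_coeffs matrice_coeffs)

-- ===== LEMMAS AND PROOFS =====

-- column sum: the common value both sides compute for column j
def colSum (m : List (List Int)) (j : Int) : Int :=
  (m.map (fun r => PySem.List.pyGetD r j 0)).sum

theorem sum_filter_ne_zero (l : List Int) : (l.filter (fun x => x ≠ 0)).sum = l.sum := by
  induction l with
  | nil => rfl
  | cons a t ih =>
    by_cases h : a = 0 <;> simp [List.filter_cons, h] <;> simpa using ih

theorem portA_col (m : List (List Int)) (j : Int) :
    (((PySem.List.pyRange 0 m.length 1).map
        (fun i => PySem.List.pyGetD (PySem.List.pyGetD m i []) j 0)).filter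
      (fun x => x ≠ 0)).sum = colSum m j := by
  have h : (PySem.List.pyRange 0 m.length 1).map
      (fun i => PySem.List.pyGetD (PySem.List.pyGetD m i []) j 0)
      = ((PySem.List.pyRange 0 m.length 1).map (fun i => PySem.List.pyGetD m i [])).map
          (fun r => PySem.List.pyGetD r j 0) := by
    simp [List.map_map, Function.comp]
  rw [h, PySem.List.map_pyGetD_pyRange_zero', sum_filter_ne_zero, colSum]

theorem portB_fold (m : List (List Int)) (a b c : Int) :
    m.foldl
      (fun (s : Int × Int × Int) row =>
        (s.1 + PySem.List.pyGetD row 0 0,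
         s.2.1 + PySem.List.pyGetD row 1 0,
         s.2.2 + PySem.List.pyGetD row 2 0)) (a, b, c)
      = (a + colSum m 0, b + colSum m 1, c + colSum m 2) := by
  induction m generalizing a b c with
  | nil => simp [colSum]
  | cons r t ih =>
    simp only [List.foldl_cons, ih, colSum, List.map_cons, List.sum_cons, Prod.mk.injEq]
    refine ⟨by ring, by ring, by ring⟩

-- ===== VERDICT =====
theorem get_total_coeffs_spec : Claim_equal_get_total_coeffs := by
  intro m _ _
  unfold Spec_get_total_coeffs get_total_coeffs get_total_coeffs_alt
  have h3 : PySem.List.pyRange 0 3 1 = [0, 1, 2] := by decide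
  rw [h3]
  simp only [List.map_cons, List.map_nil, portA_col, portB_fold]
  simp
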